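-- pv_equiv track=rewrite | github.com/CedricGullentops/Master-Thesis-Pruning-for-Object-Detection | docker-omgeving/Code/utils.py | transformDependants
-- ===== SOURCE A (Python) =====
-- def transformDependants(dependants, convolutionlist):
--     newList = []
--     done = []
--     for dependant in dependants:
--         if dependant in done:
--             continue
--         for conv in convolutionlist:
--             if (dependant == conv[1]):
--                 newList.append(conv[0])
--                 done.append(dependant)
--     return newList
-- ===== SOURCE B (Python) =====
-- def transformDependants(dependants, convolutionlist):
--     groups = {}
--     for src, dst in convolutionlist:
--         groups.setdefault(dst, []).append(src)
--     newList = []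
--     seen = set()
--     for dependant in dependants:
--         if dependant in seen:
--             continue
--         seen.add(dependant)
--         newList.extend(groups.get(dependant, []))
--     return newList
-- ===== Notes on version B (the rewrite author's own statement) =====
-- stated objective: faster
-- what changed: B builds a dict from conv target to list of sources in one pass and uses a set for already-handled dependants, replacing A's inner scan of convolutionlist per dependant and its list-membership 'done' test.
import Mathlib
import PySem

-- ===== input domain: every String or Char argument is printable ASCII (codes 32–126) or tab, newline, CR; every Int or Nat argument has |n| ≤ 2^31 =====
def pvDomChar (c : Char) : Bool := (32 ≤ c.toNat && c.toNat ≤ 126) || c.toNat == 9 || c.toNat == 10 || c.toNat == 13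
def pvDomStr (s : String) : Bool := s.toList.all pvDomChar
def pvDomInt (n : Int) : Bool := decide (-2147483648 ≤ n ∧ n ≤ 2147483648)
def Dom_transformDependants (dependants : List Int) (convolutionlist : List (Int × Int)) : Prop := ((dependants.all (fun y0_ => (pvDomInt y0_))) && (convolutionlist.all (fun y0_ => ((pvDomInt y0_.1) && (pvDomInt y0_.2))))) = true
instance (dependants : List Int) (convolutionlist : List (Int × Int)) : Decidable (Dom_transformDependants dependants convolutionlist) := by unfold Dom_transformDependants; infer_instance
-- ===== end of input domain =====

-- B replaces A's per-dependant inner scan of convolutionlist by a dict built once, and the list 'done' by a set.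

-- ===== PORT A =====
-- nested loops: state = (newList, done); inner loop appends conv[0] and dependant per match
def transformDependants (dependants : List Int) (convolutionlist : List (Int × Int)) : List Int :=
  (dependants.foldl (fun (st : List Int × List Int) dep =>
      if dep ∈ st.2 then st
      else convolutionlist.foldl (fun (st2 : List Int × List Int) conv =>
             if dep = conv.2 then (st2.1 ++ [conv.1], st2.2 ++ [dep]) else st2) st)
    ([], [])).1

-- ===== PORT B =====
def transformDependants_alt (dependants : List Int) (convolutionlist : List (Int × Int)) : List Int :=
  let groups : PySem.Dict Int (List Int) :=
    convolutionlist.foldl (fun d conv => d.modify conv.2 [] (· ++ [conv.1])) PySem.Dict.empty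
  (dependants.foldl (fun (st : List Int × PySem.Set Int) dep =>
      if dep ∈ st.2 then st
      else (st.1 ++ groups.getD dep [], PySem.Set.add st.2 dep))
    ([], PySem.Set.empty)).1

-- ===== PRECONDITION & SPEC =====
def Spec_transformDependants (dependants : List Int) (convolutionlist : List (Int × Int)) (out : List Int) : Prop := out = transformDependants_alt dependants convolutionlist
instance (dependants : List Int) (convolutionlist : List (Int × Int)) (out : List Int) : Decidable (Spec_transformDependants dependants convolutionlist out) := by unfold Spec_transformDependants; infer_instance

-- ===== CLAIM (what is proved, stated in full; the proofs are below) =====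
def Claim_equal_transformDependants : Prop := ∀ (dependants : List Int) (convolutionlist : List (Int × Int)), Dom_transformDependants dependants convolutionlist → Spec_transformDependants dependants convolutionlist (transformDependants dependants convolutionlist)

-- ===== LEMMAS AND PROOFS =====

-- the sources matched by a dependant, in convolutionlist order
def pvMatches (cl : List (Int × Int)) (dep : Int) : List Int :=
  (cl.filter (fun c => dep == c.2)).map (·.1)

-- A's inner loop over convolutionlist, characterized
theorem innerA_eq (cl : List (Int × Int)) (dep : Int) (nl dn : List Int) :
    cl.foldl (fun (st2 : List Int × List Int) conv =>
        if dep = conv.2 then (st2.1 ++ [conv.1], st2.2 ++ [dep]) else st2) (nl, dn)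
      = (nl ++ pvMatches cl dep, dn ++ (pvMatches cl dep).map (fun _ => dep)) := by
  induction cl generalizing nl dn with
  | nil => simp [pvMatches]
  | cons c cs ih =>
    simp only [List.foldl_cons]
    by_cases h : dep = c.2
    · rw [if_pos h, ih]
      simp [pvMatches, h]
    · rw [if_neg h, ih]
      simp [pvMatches, h]

-- B's grouping loop, characterized
theorem groups_getD (cl : List (Int × Int)) (d : PySem.Dict Int (List Int)) (dep : Int) :
    (cl.foldl (fun d conv => d.modify conv.2 [] (· ++ [conv.1])) d).getD dep []
      = d.getD dep [] ++ pvMatches cl dep := by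
  induction cl generalizing d with
  | nil => simp [pvMatches]
  | cons c cs ih =>
    simp only [List.foldl_cons]
    rw [ih]
    by_cases h : dep = c.2
    · simp [pvMatches, PySem.Dict.getD_modify, h]
    · simp [pvMatches, PySem.Dict.getD_modify, h]

-- main invariant: A's done-list holds exactly the seen dependants that had a match
theorem main_inv (deps : List Int) (cl : List (Int × Int)) (nl dn : List Int) (sn : PySem.Set Int)
    (h : ∀ x, x ∈ dn ↔ x ∈ sn ∧ pvMatches cl x ≠ []) :
    (deps.foldl (fun (st : List Int × List Int) dep =>
        if dep ∈ st.2 then st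
        else cl.foldl (fun (st2 : List Int × List Int) conv =>
               if dep = conv.2 then (st2.1 ++ [conv.1], st2.2 ++ [dep]) else st2) st)
      (nl, dn)).1
    = (deps.foldl (fun (st : List Int × PySem.Set Int) dep =>
        if dep ∈ st.2 then st
        else (st.1 ++ pvMatches cl dep, PySem.Set.add st.2 dep))
      (nl, sn)).1 := by
  induction deps generalizing nl dn sn with
  | nil => simp
  | cons dep rest ih =>
    by_cases hs : dep ∈ sn
    · by_cases hm : pvMatches cl dep = []
      · have hd : dep ∉ dn := by
          intro hmem; exact ((h dep).mp hmem).2 hm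
        simp only [List.foldl_cons, if_pos hs, if_neg hd, innerA_eq, hm,
          List.map_nil, List.append_nil]
        exact ih nl dn sn h
      · have hd : dep ∈ dn := (h dep).mpr ⟨hs, hm⟩
        simp only [List.foldl_cons, if_pos hs, if_pos hd]
        exact ih nl dn sn h
    · have hd : dep ∉ dn := by
        intro hmem; exact hs ((h dep).mp hmem).1
      simp only [List.foldl_cons, if_neg hs, if_neg hd, innerA_eq]
      apply ih
      intro x
      constructor
      · intro hx
        rcases List.mem_append.mp hx with hx | hx
        · rcases (h x).mp hx with ⟨h1, h2⟩
          exact ⟨(PySem.Set.mem_add _ _ _).mpr (Or.inl h1), h2⟩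
        · rcases List.mem_map.mp hx with ⟨y, hy, rfl⟩
          refine ⟨(PySem.Set.mem_add _ _ _).mpr (Or.inr rfl), ?_⟩
          intro hnil
          rw [hnil] at hy
          exact List.not_mem_nil hy
      · rintro ⟨h1, h2⟩
        rcases (PySem.Set.mem_add _ _ _).mp h1 with h1 | rfl
        · exact List.mem_append.mpr (Or.inl ((h x).mpr ⟨h1, h2⟩))
        · refine List.mem_append.mpr (Or.inr ?_)
          rcases List.exists_mem_of_ne_nil _ h2 with ⟨y, hy⟩
          exact List.mem_map.mpr ⟨y, hy, rfl⟩

-- ===== VERDICT (by name: the statement is the Claim_ definition above) =====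
theorem transformDependants_spec : Claim_equal_transformDependants := by
  intro deps cl _
  unfold Spec_transformDependants transformDependants transformDependants_alt
  simp only [groups_getD, PySem.Dict.getD_empty, List.nil_append]
  exact main_inv deps cl [] [] PySem.Set.empty (by simp [PySem.Set.empty])
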